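-- pv_equiv track=rewrite | github.com/dakota-jamie-sims/OpenAI-Learning-Center-Agent | learning_center_agent/services/kb_search.py | _parse_article_results
-- ===== SOURCE A (Python) =====
-- from typing import List, Dict, Any, Optional
--
-- def _parse_article_results(results_text: str) -> List[Dict[str, Any]]:
--     """Parse article results from search text"""
--     # Simple parsing - in production, this would be more sophisticated
--     articles = []
--     lines = results_text.split('\n')
--
--     current_article = {}
--     for line in lines:
--         if line.strip().startswith('Article:') or line.strip().startswith('Title:'):
--             if current_article:
--                 articles.append(current_article)
--             current_article = {"title": line.replace('Article:', '').replace('Title:', '').strip()}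
--         elif line.strip() and current_article:
--             if 'summary' not in current_article:
--                 current_article['summary'] = line.strip()
--             else:
--                 current_article['summary'] += ' ' + line.strip()
--
--     if current_article:
--         articles.append(current_article)
--
--     return articles[:3]  # Return top 3 articles
-- ===== SOURCE B (Python) =====
-- from typing import List, Dict, Any
--
-- def _parse_article_results(results_text: str) -> List[Dict[str, Any]]:
--     """Parse article results from search text (block segmentation + map)."""
--     # Pass 1: segment lines into (header_line, body_lines) blocks.
--     blocks = []
--     for line in results_text.split('\n'):
--         s = line.strip()
--         if s.startswith('Article:') or s.startswith('Title:'):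
--             blocks.append((line, []))
--         elif s and blocks:
--             blocks[-1][1].append(s)
--     # Pass 2: map the first three blocks to article dicts.
--     out = []
--     for header, body in blocks[:3]:
--         title = header.replace('Article:', '').replace('Title:', '').strip()
--         if body:
--             out.append({"title": title, "summary": ' '.join(body)})
--         else:
--             out.append({"title": title})
--     return out
-- ===== Notes on version B (the rewrite author's own statement) =====
-- stated objective: alternative
-- what changed: Replaces A's single fold that mutates a current_article dict (conditional append plus in-place summary concatenation) with a two-pass decomposition: segment lines into (header, body-lines) blocks, then map the first three blocks to dicts, space-joining each body.
import Mathlib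
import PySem

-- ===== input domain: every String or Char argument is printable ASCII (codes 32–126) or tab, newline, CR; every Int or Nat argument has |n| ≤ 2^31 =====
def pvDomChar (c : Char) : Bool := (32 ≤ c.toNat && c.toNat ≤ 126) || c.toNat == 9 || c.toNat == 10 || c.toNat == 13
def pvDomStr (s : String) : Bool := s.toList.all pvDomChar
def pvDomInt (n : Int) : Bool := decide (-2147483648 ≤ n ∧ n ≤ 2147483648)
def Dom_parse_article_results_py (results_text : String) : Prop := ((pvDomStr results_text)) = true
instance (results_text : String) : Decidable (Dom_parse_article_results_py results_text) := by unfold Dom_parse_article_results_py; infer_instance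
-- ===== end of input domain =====

-- B replaces A's single mutated current_article dict with explicit block segmentation followed
-- by a map over the first three blocks (alternative decomposition, same cost).

-- ===== PORT A =====
-- title computed at the header line: line.replace('Article:','').replace('Title:','').strip()
def pA_title (line : String) : String :=
  PySem.Str.strip (PySem.Str.replace (PySem.Str.replace line "Article:" "") "Title:" "")

-- one iteration of A's for-loop; state = (articles, current_article)
-- ('current_article["summary"] += ...' is d["summary"] = d["summary"] + ...; the key is present
-- in that branch, so insert with getD is exact)
def pA_step (st : List (PySem.Dict String String) × PySem.Dict String String) (line : String) :
    List (PySem.Dict String String) × PySem.Dict String String :=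
  if PySem.Str.startswith (PySem.Str.strip line) "Article:"
      || PySem.Str.startswith (PySem.Str.strip line) "Title:" then
    ((if st.2.size ≠ 0 then st.1 ++ [st.2] else st.1),
     PySem.Dict.empty.insert "title" (pA_title line))
  else if PySem.Str.strip line ≠ "" ∧ st.2.size ≠ 0 then
    (st.1,
     if (st.2.get? "summary").isNone then st.2.insert "summary" (PySem.Str.strip line)
     else st.2.insert "summary" (st.2.getD "summary" "" ++ " " ++ PySem.Str.strip line))
  else st

-- results_text.split('\n'): sep ≠ "" so split? is always some
def parse_article_results_py (results_text : String) : List (List (String × String)) :=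
  let st := ((PySem.Str.split? results_text "\n").getD []).foldl pA_step ([], PySem.Dict.empty)
  let articles := if st.2.size ≠ 0 then st.1 ++ [st.2] else st.1
  (articles.take 3).map PySem.Dict.items

-- ===== PORT B =====
-- pass 1 step: segment lines into (header_line, body_lines) blocks
def pB_step (blocks : List (String × List String)) (line : String) : List (String × List String) :=
  let s := PySem.Str.strip line
  if PySem.Str.startswith s "Article:" || PySem.Str.startswith s "Title:" then
    blocks ++ [(line, [])]
  else if s = "" then blocks
  else
    match blocks.getLast? with
    | none => blocks
    | some (h, b) => blocks.dropLast ++ [(h, b ++ [s])]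

-- pass 2: one block to one article dict
def pB_mk (blk : String × List String) : List (String × String) :=
  let title := PySem.Str.strip (PySem.Str.replace (PySem.Str.replace blk.1 "Article:" "") "Title:" "")
  if blk.2.isEmpty then (PySem.Dict.ofList [("title", title)]).items
  else (PySem.Dict.ofList [("title", title), ("summary", PySem.Str.join " " blk.2)]).items

def parse_article_results_py_alt (results_text : String) : List (List (String × String)) :=
  ((((PySem.Str.split? results_text "\n").getD []).foldl pB_step []).take 3).map pB_mk

-- ===== PRECONDITION & SPEC =====
def Spec_parse_article_results_py (results_text : String) (out : List (List (String × String))) : Prop := out = parse_article_results_py_alt results_text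
instance (results_text : String) (out : List (List (String × String))) : Decidable (Spec_parse_article_results_py results_text out) := by unfold Spec_parse_article_results_py; infer_instance

-- ===== CLAIM (what is proved, stated in full; the proofs are below) =====
def Claim_equal_parse_article_results_py : Prop := ∀ (results_text : String), Dom_parse_article_results_py results_text → Spec_parse_article_results_py results_text (parse_article_results_py results_text)

-- ===== LEMMAS AND PROOFS =====

theorem interc_concat {α} (sep : List α) (xs : List (List α)) (y : List α) (h : xs ≠ []) :
    sep.intercalate (xs ++ [y]) = sep.intercalate xs ++ sep ++ y := by
  induction xs with
  | nil => simp at h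
  | cons a t ih =>
    cases t with
    | nil => simp [List.intercalate]
    | cons b u =>
      have := ih (by simp)
      simp [List.intercalate] at this ⊢
      simp [List.intersperse] at this ⊢
      rw [this]

theorem join_concat (b : List String) (s : String) (h : b ≠ []) :
    PySem.Str.join " " (b ++ [s]) = PySem.Str.join " " b ++ " " ++ s := by
  apply String.toList_injective
  simp only [PySem.Str.toList_join, String.toList_append, List.map_append, List.map_cons,
    List.map_nil, PySem.Chars.join]
  rw [interc_concat _ _ _ (by simpa using h)]

theorem join_single (s : String) : PySem.Str.join " " [s] = s := by
  simp [PySem.Str.join, PySem.Chars.join, List.intercalate]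

-- the dict A's current_article holds for a given B-block
def mkD (blk : String × List String) : PySem.Dict String String :=
  if blk.2 = [] then PySem.Dict.mk [("title", pA_title blk.1)]
  else PySem.Dict.mk [("title", pA_title blk.1), ("summary", PySem.Str.join " " blk.2)]

-- A's loop state corresponding to a B block list
def toA (blocks : List (String × List String)) :
    List (PySem.Dict String String) × PySem.Dict String String :=
  match blocks.getLast? with
  | none => ([], PySem.Dict.empty)
  | some b => (blocks.dropLast.map mkD, mkD b)

theorem toA_concat (bs : List (String × List String)) (b : String × List String) :
    toA (bs ++ [b]) = (bs.map mkD, mkD b) := by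
  simp [toA]

theorem size_mkD (b : String × List String) : (mkD b).size ≠ 0 := by
  unfold mkD; split <;> simp [PySem.Dict.size]

theorem step_comm (blocks : List (String × List String)) (line : String) :
    pA_step (toA blocks) line = toA (pB_step blocks line) := by
  by_cases hH : (PySem.Str.startswith (PySem.Str.strip line) "Article:"
      || PySem.Str.startswith (PySem.Str.strip line) "Title:") = true
  · rcases List.eq_nil_or_concat blocks with rfl | ⟨bs, b, rfl⟩
    · simp only [pA_step, pB_step, toA]
      rw [if_pos hH, if_pos hH]
      simp [mkD, PySem.Dict.size, PySem.Dict.empty]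
      rfl
    · rw [List.concat_eq_append, toA_concat]
      simp only [pA_step, pB_step]
      rw [if_pos hH, if_pos hH, if_pos (size_mkD b)]
      rw [show bs ++ [b] ++ [(line, ([] : List String))] = (bs ++ [b]) ++ [(line, [])] by simp,
        toA_concat]
      simp [mkD]
      rfl
  · by_cases hE : PySem.Str.strip line = ""
    · simp only [pA_step, pB_step]
      rw [if_neg hH, if_neg hH, if_pos hE, if_neg (by simp [hE])]
    · rcases List.eq_nil_or_concat blocks with rfl | ⟨bs, b, rfl⟩
      · simp only [pA_step, pB_step, toA]
        rw [if_neg hH, if_neg hH, if_neg hE]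
        simp [PySem.Dict.size, PySem.Dict.empty]
      · rcases b with ⟨h, body⟩
        rw [List.concat_eq_append, toA_concat]
        simp only [pA_step, pB_step]
        rw [if_neg hH, if_neg hH, if_neg hE, if_pos (⟨hE, size_mkD _⟩ : _ ∧ _)]
        simp only [List.getLast?_concat, List.dropLast_concat]
        rw [toA_concat]
        rcases body with _ | ⟨x, xs⟩
        · rw [show mkD (h, [] ++ [PySem.Str.strip line]) = PySem.Dict.mk
            [("title", pA_title h), ("summary", PySem.Str.strip line)] by
              rw [List.nil_append, mkD, if_neg (by simp), join_single]]
          rfl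
        · rw [show mkD (h, x :: xs ++ [PySem.Str.strip line]) = PySem.Dict.mk
            [("title", pA_title h), ("summary", PySem.Str.join " " (x :: xs) ++ " " ++ PySem.Str.strip line)] by
              rw [mkD, if_neg (by simp), join_concat _ _ (List.cons_ne_nil x xs)]]
          rfl

theorem finish_mkD (blocks : List (String × List String)) :
    (if (toA blocks).2.size ≠ 0 then (toA blocks).1 ++ [(toA blocks).2] else (toA blocks).1)
      = blocks.map mkD := by
  rcases List.eq_nil_or_concat blocks with rfl | ⟨bs, b, rfl⟩
  · simp [toA, PySem.Dict.size, PySem.Dict.empty]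
  · rw [List.concat_eq_append, toA_concat]
    simp [size_mkD]

theorem items_mkD (b : String × List String) : (mkD b).items = pB_mk b := by
  rcases b with ⟨h, body⟩
  cases body <;> rfl

-- ===== VERDICT (by name: the statement is the Claim_ definition above) =====
set_option maxHeartbeats 2000000 in
theorem parse_article_results_py_spec : Claim_equal_parse_article_results_py := by
  intro rt _
  show parse_article_results_py rt = parse_article_results_py_alt rt
  unfold parse_article_results_py parse_article_results_py_alt
  have h := List.foldl_hom (f := toA) (g₁ := pB_step) (g₂ := pA_step)
      (l := (PySem.Str.split? rt "\n").getD []) (init := [])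
      (fun x y => step_comm x y)
  rw [show toA [] = (([] : List (PySem.Dict String String)), PySem.Dict.empty) from rfl] at h
  simp only [h, finish_mkD, ← List.map_take, List.map_map]
  exact List.map_congr_left (fun b _ => items_mkD b)
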